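-- pv_equiv track=rewrite | github.com/1div0/OpenMeta | registry/tools/generate_makernote_tag_names_inc.py | _cpp_ident
-- ===== SOURCE A (Python) =====
-- from typing import Dict, List, Optional, Tuple
--
-- def _cpp_ident(name: str) -> str:
--     out: List[str] = []
--     cap_next = True
--     for ch in name:
--         if ch.isalnum():
--             out.append(ch.upper() if cap_next else ch)
--             cap_next = False
--         else:
--             cap_next = True
--     return "".join(out) if out else "Unknown"
-- ===== SOURCE B (Python) =====
-- def _cpp_ident(name: str) -> str:
--     # tokenize into maximal alnum runs, then capitalize each run's head
--     pieces = []
--     rest = name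
--     while rest:
--         if not rest[0].isalnum():
--             rest = rest[1:]
--             continue
--         j = 1
--         while j < len(rest) and rest[j].isalnum():
--             j += 1
--         pieces.append(rest[0].upper() + rest[1:j])
--         rest = rest[j:]
--     return "".join(pieces) if pieces else "Unknown"
-- ===== Notes on version B (the rewrite author's own statement) =====
-- stated objective: alternative
-- what changed: Replaces the per-character loop with a cap_next flag by an explicit tokenizer that splits the string into maximal alnum runs and emits each run with its first character uppercased.
import Mathlib
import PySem

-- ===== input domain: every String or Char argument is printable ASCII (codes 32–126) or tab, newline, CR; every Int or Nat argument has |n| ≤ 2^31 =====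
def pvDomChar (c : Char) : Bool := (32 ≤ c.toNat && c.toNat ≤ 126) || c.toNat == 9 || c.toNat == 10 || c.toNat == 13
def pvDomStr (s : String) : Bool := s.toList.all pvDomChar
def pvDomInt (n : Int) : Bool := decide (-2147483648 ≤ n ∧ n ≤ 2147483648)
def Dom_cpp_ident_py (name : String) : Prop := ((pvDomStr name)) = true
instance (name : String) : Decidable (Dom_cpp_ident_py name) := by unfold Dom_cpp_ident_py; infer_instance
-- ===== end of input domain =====

-- B replaces A's single per-character loop with a cap_next flag by an explicit
-- tokenizer into maximal alnum runs, uppercasing each run's head (objective: alternative).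

-- ===== PORT A =====
-- per-character loop carrying (out, cap_next)
def cpp_ident_py (name : String) : String :=
  let r := name.toList.foldl (fun (st : List Char × Bool) ch =>
    if PySem.Chars.isalnum ch then
      (st.1 ++ [if st.2 then PySem.Chars.upperChar ch else ch], false)
    else (st.1, true)) ([], true)
  if r.1.isEmpty then "Unknown" else String.mk r.1

-- ===== PORT B =====
-- tokenizer: skip non-alnum chars; at an alnum char take the whole run
-- (inner while = takeWhile / the advance rest = rest[j:] = dropWhile)
def pvRuns (cs : List Char) : List Char :=
  match cs with
  | [] => []
  | c :: rest =>
    if PySem.Chars.isalnum c then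
      (PySem.Chars.upperChar c :: rest.takeWhile PySem.Chars.isalnum)
        ++ pvRuns (rest.dropWhile PySem.Chars.isalnum)
    else pvRuns rest
termination_by cs.length
decreasing_by
  · exact Nat.lt_succ_of_le (List.length_dropWhile_le _ _)
  · simp

def cpp_ident_py_alt (name : String) : String :=
  let cs := pvRuns name.toList
  if cs.isEmpty then "Unknown" else String.mk cs

-- ===== PRECONDITION & SPEC =====
def Spec_cpp_ident_py (name : String) (out : String) : Prop := out = cpp_ident_py_alt name
instance (name : String) (out : String) : Decidable (Spec_cpp_ident_py name out) := by unfold Spec_cpp_ident_py; infer_instance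

-- ===== CLAIM (what is proved, stated in full; the proofs are below) =====
def Claim_equal_cpp_ident_py : Prop := ∀ (name : String), Dom_cpp_ident_py name → Spec_cpp_ident_py name (cpp_ident_py name)

-- ===== LEMMAS AND PROOFS =====

-- what B produces when the current run has already been started (cap_next = false)
def pvCont (cs : List Char) : List Char :=
  match cs with
  | [] => []
  | c :: rest => if PySem.Chars.isalnum c then c :: pvCont rest else pvRuns rest

theorem pvCont_eq (cs : List Char) :
    pvCont cs = cs.takeWhile PySem.Chars.isalnum
      ++ pvRuns (cs.dropWhile PySem.Chars.isalnum) := by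
  induction cs with
  | nil => simp [pvCont, pvRuns]
  | cons c rest ih =>
    by_cases h : PySem.Chars.isalnum c
    · simp [pvCont, List.takeWhile_cons, List.dropWhile_cons, h, ih]
    · simp [pvCont, List.takeWhile_cons, List.dropWhile_cons, h, pvRuns]

theorem pvFold_invariant (cs : List Char) : ∀ acc : List Char,
    (cs.foldl (fun (st : List Char × Bool) ch =>
      if PySem.Chars.isalnum ch then
        (st.1 ++ [if st.2 then PySem.Chars.upperChar ch else ch], false)
      else (st.1, true)) (acc, true)).1 = acc ++ pvRuns cs ∧
    (cs.foldl (fun (st : List Char × Bool) ch =>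
      if PySem.Chars.isalnum ch then
        (st.1 ++ [if st.2 then PySem.Chars.upperChar ch else ch], false)
      else (st.1, true)) (acc, false)).1 = acc ++ pvCont cs := by
  induction cs with
  | nil => simp [pvRuns, pvCont]
  | cons c rest ih =>
    intro acc
    by_cases h : PySem.Chars.isalnum c
    · constructor
      · simp only [List.foldl_cons, h, Bool.false_eq_true, eq_self_iff_true, ite_true, ite_false]
        rw [(ih (acc ++ [PySem.Chars.upperChar c])).2]
        simp [pvRuns, h, pvCont_eq]
      · simp only [List.foldl_cons, h, Bool.false_eq_true, eq_self_iff_true, ite_true, ite_false]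
        rw [(ih (acc ++ [c])).2]
        simp [pvCont, h]
    · constructor
      · simp only [List.foldl_cons, h, Bool.false_eq_true, eq_self_iff_true, ite_true, ite_false]
        rw [(ih acc).1]
        simp [pvRuns, h]
      · simp only [List.foldl_cons, h, Bool.false_eq_true, eq_self_iff_true, ite_true, ite_false]
        rw [(ih acc).1]
        simp [pvCont, h]

-- ===== VERDICT (by name: the statement is the Claim_ definition above) =====
theorem cpp_ident_py_spec : Claim_equal_cpp_ident_py := by
  intro name _
  unfold Spec_cpp_ident_py
  simp only [cpp_ident_py, cpp_ident_py_alt, (pvFold_invariant name.toList []).1,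
    List.nil_append]
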